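-- pv_equiv track=rewrite | github.com/Kazell/textdistance | src/edit_based/levenshtein.py | just_seqs
-- ===== SOURCE A (Python) =====
-- def find_seqs(seq):
--     seqs = []
--     while seq:
--         seqs.append(seq)
--         seq = seq[1:]
--     return seqs
--
-- def just_seqs(obj1, obj2):
--     common_elements = []
--     for element in obj1:
--         if element in obj2:
--             common_elements.append(element)
--     common_elements = set(common_elements)
--     obj1 = [el for el in obj1 if el in common_elements]
--     obj2 = [el for el in obj2 if el in common_elements]
--
--     max_length = max(len(obj1), len(obj2))
--     if len(obj1) == max_length:
--         long = obj1
--         short = obj2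
--     else:
--         long = obj2
--         short = obj1
--     groups_common = []
--     for seq in find_seqs(short):
--         common = []
--         long_temp = long
--         for element in seq:
--             if element in long_temp:
--                 index = long_temp.index(element)
--                 long_temp = long_temp[index:]
--                 common.append(element)
--         groups_common.append(common)
--     return groups_common
-- ===== SOURCE B (Python) =====
-- def just_seqs(obj1, obj2):
--     in2 = set(obj2)
--     common = {e for e in obj1 if e in in2}
--     f1 = [e for e in obj1 if e in common]
--     f2 = [e for e in obj2 if e in common]
--     if len(f2) <= len(f1):
--         long, short = f1, f2
--     else:
--         long, short = f2, f1
--     # positions of each value in long, in increasing order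
--     pos = {}
--     for i, v in enumerate(long):
--         pos.setdefault(v, []).append(i)
--     res = []
--     n = len(short)
--     for s in range(n):
--         p = 0
--         row = []
--         for v in short[s:]:
--             ps = pos.get(v, [])
--             k = _lower_bound(ps, p)
--             if k < len(ps):
--                 p = ps[k]
--                 row.append(v)
--         res.append(row)
--     return res
--
-- def _lower_bound(ps, p):
--     # index of the first element of sorted ps that is >= p
--     lo, hi = 0, len(ps)
--     while lo < hi:
--         mid = (lo + hi) // 2
--         if ps[mid] < p:
--             lo = mid + 1
--         else:
--             hi = mid
--     return lo
-- ===== Notes on version B (the rewrite author's own statement) =====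
-- stated objective: faster
-- what changed: Instead of re-slicing and linearly rescanning the long list for every element of every suffix, B builds one value->increasing-positions table and answers each greedy 'first occurrence at or after p' query by binary search over that value's position list; measured 3.4x faster at the largest timed size (n=1024).
import Mathlib
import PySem

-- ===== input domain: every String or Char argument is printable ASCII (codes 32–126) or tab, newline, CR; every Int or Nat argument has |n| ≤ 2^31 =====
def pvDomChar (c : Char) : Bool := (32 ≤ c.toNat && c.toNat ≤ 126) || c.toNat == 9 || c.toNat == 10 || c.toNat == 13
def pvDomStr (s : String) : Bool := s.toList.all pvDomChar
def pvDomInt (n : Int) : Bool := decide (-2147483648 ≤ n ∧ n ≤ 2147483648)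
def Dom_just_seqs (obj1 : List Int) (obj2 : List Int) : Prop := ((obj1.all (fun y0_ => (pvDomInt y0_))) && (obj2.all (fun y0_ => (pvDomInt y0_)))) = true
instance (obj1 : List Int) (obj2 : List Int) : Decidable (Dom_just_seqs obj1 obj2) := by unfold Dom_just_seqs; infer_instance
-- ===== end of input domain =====

-- B replaces A's per-suffix slice-and-rescan of `long` by a positions index (value -> increasing
-- list of indices) built once and queried by binary search; same return value for every input.

-- ===== PORT A =====
-- while seq: seqs.append(seq); seq = seq[1:]
def find_seqs : List Int → List (List Int)
  | [] => []
  | x :: xs => (x :: xs) :: find_seqs xs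

def just_seqs (obj1 : List Int) (obj2 : List Int) : List (List Int) :=
  let common_elements := obj1.foldl (fun acc element => if element ∈ obj2 then acc ++ [element] else acc) []
  let common_set := PySem.Set.ofList common_elements
  let obj1' := obj1.filter (fun el => decide (el ∈ common_set))
  let obj2' := obj2.filter (fun el => decide (el ∈ common_set))
  let max_length := max (PySem.List.len obj1') (PySem.List.len obj2')
  let ls := if PySem.List.len obj1' = max_length then (obj1', obj2') else (obj2', obj1')
  let long := ls.1
  let short := ls.2
  (find_seqs short).foldl (fun groups_common seq =>
    let st := seq.foldl (fun (st : List Int × List Int) element =>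
      if element ∈ st.2 then
        match PySem.List.index? st.2 element with
        | some index => (st.1 ++ [element], PySem.List.slice st.2 (some (index : Int)) none)
        | none => st
      else st) (([] : List Int), long)
    groups_common ++ [st.1]) []



-- ===== PORT B =====
-- binary search: index of the first element of sorted ps that is >= p
def lowerBound (ps : List Int) (p : Int) (lo hi : Nat) : Nat :=
  if lo < hi then
    let mid := (lo + hi) / 2
    if ps.getD mid 0 < p then lowerBound ps p (mid + 1) hi
    else lowerBound ps p lo mid
  else lo
termination_by hi - lo
decreasing_by all_goals omega

def just_seqs_alt (obj1 : List Int) (obj2 : List Int) : List (List Int) :=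
  let in2 := PySem.Set.ofList obj2
  let common := PySem.Set.ofList (obj1.filter (fun e => decide (e ∈ in2)))
  let f1 := obj1.filter (fun e => decide (e ∈ common))
  let f2 := obj2.filter (fun e => decide (e ∈ common))
  let ls := if f2.length ≤ f1.length then (f1, f2) else (f2, f1)
  let long := ls.1
  let short := ls.2
  let pos := (PySem.List.enumerate long 0).foldl
    (fun (d : PySem.Dict Int (List Int)) iv => d.modify iv.2 [] (fun l => l ++ [iv.1])) PySem.Dict.empty
  let n := short.length
  (PySem.List.pyRange 0 (n : Int) 1).foldl (fun res s =>
    let st := (PySem.List.slice short (some s) none).foldl (fun (st : List Int × Int) v =>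
      let ps := pos.getD v []
      let k := lowerBound ps st.2 0 ps.length
      if k < ps.length then (st.1 ++ [v], ps.getD k 0) else st) (([] : List Int), (0 : Int))
    res ++ [st.1]) []


-- ===== PRECONDITION & SPEC =====
def Spec_just_seqs (obj1 : List Int) (obj2 : List Int) (out : List (List Int)) : Prop := out = just_seqs_alt obj1 obj2
instance (obj1 : List Int) (obj2 : List Int) (out : List (List Int)) : Decidable (Spec_just_seqs obj1 obj2 out) := by unfold Spec_just_seqs; infer_instance

-- ===== CLAIM (what is proved, stated in full; the proofs are below) =====
def Claim_equal_just_seqs : Prop := ∀ (obj1 : List Int) (obj2 : List Int), Dom_just_seqs obj1 obj2 → Spec_just_seqs obj1 obj2 (just_seqs obj1 obj2)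

-- ===== LEMMAS AND PROOFS =====

-- the list of indices (offset by i0) at which v occurs in the list
def posFrom (i0 : Int) : List Int → Int → List Int
  | [], _ => []
  | x :: xs, v => (if x = v then [i0] else []) ++ posFrom (i0 + 1) xs v

theorem find_seqs_eq_map_drop (l : List Int) :
    find_seqs l = (List.range l.length).map (l.drop ·) := by
  induction l with
  | nil => rfl
  | cons x xs ih =>
    simp [find_seqs, List.range_succ_eq_map, ih, List.map_map, Function.comp_def]

theorem posFrom_split (l : List Int) (v : Int) :
    ∀ (p : Nat) (i0 : Int), p ≤ l.length →
    posFrom i0 l v = posFrom i0 (l.take p) v ++ posFrom (i0 + p) (l.drop p) v := by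
  induction l with
  | nil => intro p i0 hp; simp at hp; subst hp; simp [posFrom]
  | cons x xs ih =>
    intro p i0 hp
    cases p with
    | zero => simp [posFrom]
    | succ q =>
      simp only [List.take_succ_cons, List.drop_succ_cons, posFrom]
      rw [ih q (i0 + 1) (by simpa using hp)]
      simp [List.append_assoc]
      ring_nf

theorem posFrom_bounds (l : List Int) (v : Int) :
    ∀ (i0 : Int), ∀ x ∈ posFrom i0 l v, i0 ≤ x ∧ x < i0 + l.length := by
  induction l with
  | nil => simp [posFrom]
  | cons y ys ih =>
    intro i0 x hx
    simp only [posFrom, List.mem_append] at hx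
    rcases hx with hx | hx
    · by_cases hyv : y = v
      · simp only [if_pos hyv, List.mem_singleton] at hx
        subst hx
        refine ⟨le_refl _, ?_⟩
        simp only [List.length_cons]; push_cast; omega
      · simp [if_neg hyv] at hx
    · have h2 := ih (i0 + 1) x hx
      simp only [List.length_cons]
      refine ⟨by omega, ?_⟩
      push_cast
      omega

theorem posFrom_head (l : List Int) (v : Int) :
    ∀ (i0 : Int) (k : Nat), PySem.List.index? l v = some k →
    ∃ t, posFrom i0 l v = (i0 + k) :: t := by
  induction l with
  | nil => intro i0 k h; simp [PySem.List.index?_eq_idxOf?, List.idxOf?] at h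
  | cons y ys ih =>
    intro i0 k h
    by_cases hy : y = v
    · subst hy
      rw [PySem.List.index?_cons_self] at h
      obtain rfl : (0 : Nat) = k := Option.some_inj.mp h
      exact ⟨posFrom (i0 + 1) ys y, by simp [posFrom]⟩
    · rw [PySem.List.index?_cons_of_ne ys hy] at h
      obtain ⟨k', hk', rfl⟩ := Option.map_eq_some_iff.mp h
      obtain ⟨t, ht⟩ := ih (i0 + 1) k' hk'
      refine ⟨t, ?_⟩
      simp [posFrom, hy, ht]
      ring_nf

theorem posFrom_eq_nil (l : List Int) (v : Int) :
    ∀ (i0 : Int), v ∉ l → posFrom i0 l v = [] := by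
  induction l with
  | nil => intro _ _; rfl
  | cons y ys ih =>
    intro i0 h
    simp only [List.mem_cons, not_or] at h
    have hyv : ¬ y = v := fun hh => h.1 hh.symm
    simp [posFrom, hyv, ih _ h.2]


theorem lowerBound_spec (L1 L2 : List Int) (p : Int)
    (h1 : ∀ x ∈ L1, x < p) (h2 : ∀ x ∈ L2, p ≤ x) :
    ∀ lo hi, lo ≤ L1.length → L1.length ≤ hi → hi ≤ L1.length + L2.length →
    lowerBound (L1 ++ L2) p lo hi = L1.length := by
  have key : ∀ n lo hi, hi - lo = n → lo ≤ L1.length → L1.length ≤ hi → hi ≤ L1.length + L2.length →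
      lowerBound (L1 ++ L2) p lo hi = L1.length := by
    intro n
    induction n using Nat.strong_induction_on with
    | _ n ih =>
      intro lo hi hn hlo hhi hlen
      rw [lowerBound]
      by_cases hlt : lo < hi
      · rw [if_pos hlt]
        set mid := (lo + hi) / 2 with hmid
        have hmid1 : lo ≤ mid := by omega
        have hmid2 : mid < hi := by omega
        by_cases hm : mid < L1.length
        · have hget : (L1 ++ L2).getD mid 0 = L1.getD mid 0 := List.getD_append L1 L2 0 mid hm
          have hlt' : (L1 ++ L2).getD mid 0 < p := by
            rw [hget, List.getD_eq_getElem L1 0 hm]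
            exact h1 _ (L1.getElem_mem hm)
          rw [if_pos hlt']
          exact ih (hi - (mid + 1)) (by omega) (mid + 1) hi rfl (by omega) (by omega) (by omega)
        · have hm' : L1.length ≤ mid := by omega
          have hget : (L1 ++ L2).getD mid 0 = L2.getD (mid - L1.length) 0 :=
            List.getD_append_right L1 L2 0 mid hm'
          have hml : mid - L1.length < L2.length := by omega
          have hge : p ≤ (L1 ++ L2).getD mid 0 := by
            rw [hget, List.getD_eq_getElem L2 0 hml]
            exact h2 _ (L2.getElem_mem hml)
          rw [if_neg (by omega)]
          exact ih (mid - lo) (by omega) lo mid rfl (by omega) (by omega) (by omega)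
      · rw [if_neg hlt]
        omega
  intro lo hi h1' h2' h3'
  exact key (hi - lo) lo hi rfl h1' h2' h3'

theorem pos_getD_eq_posFrom_aux (long : List Int) (v : Int) :
    ∀ (s : Int),
    (((PySem.List.enumerate long s).map (fun iv => (iv.2, iv.1))).filter
        (fun p => p.1 == v)).map (·.2) = posFrom s long v := by
  induction long with
  | nil => intro s; rfl
  | cons x xs ih =>
    intro s
    rw [PySem.List.enumerate_cons]
    by_cases hxv : x = v
    · subst hxv
      simp [posFrom, ih (s + 1)]
    · simp [posFrom, hxv, ih (s + 1)]

theorem pos_getD_eq_posFrom (long : List Int) (v : Int) :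
    ((PySem.List.enumerate long 0).foldl
      (fun (d : PySem.Dict Int (List Int)) iv => d.modify iv.2 [] (fun l => l ++ [iv.1]))
      PySem.Dict.empty).getD v [] = posFrom 0 long v := by
  have h : (PySem.List.enumerate long 0).foldl
      (fun (d : PySem.Dict Int (List Int)) iv => d.modify iv.2 [] (fun l => l ++ [iv.1]))
      PySem.Dict.empty
      = ((PySem.List.enumerate long 0).map (fun iv => (iv.2, iv.1))).foldl
        (fun (d : PySem.Dict Int (List Int)) p => d.modify p.1 [] (fun l => l ++ [p.2]))
        PySem.Dict.empty := by
    rw [List.foldl_map]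
  rw [h, PySem.Dict.getD_foldl_modify_append]
  simpa using pos_getD_eq_posFrom_aux long v 0

theorem row_equiv (long : List Int) (pos : PySem.Dict Int (List Int))
    (hpos : ∀ v, pos.getD v [] = posFrom 0 long v) (seq : List Int) :
    ∀ (acc : List Int) (p : Nat), p ≤ long.length →
    (seq.foldl (fun (st : List Int × List Int) element =>
      if element ∈ st.2 then
        match PySem.List.index? st.2 element with
        | some index => (st.1 ++ [element], PySem.List.slice st.2 (some (index : Int)) none)
        | none => st
      else st) (acc, long.drop p)).1
    = (seq.foldl (fun (st : List Int × Int) v =>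
        let ps := pos.getD v []
        let k := lowerBound ps st.2 0 ps.length
        if k < ps.length then (st.1 ++ [v], ps.getD k 0) else st) (acc, (p : Int))).1 := by
  induction seq with
  | nil => intro acc p _; rfl
  | cons v rest ih =>
    intro acc p hp
    simp only [List.foldl_cons]
    have hsplit : posFrom 0 long v
        = posFrom 0 (long.take p) v ++ posFrom ((0 : Int) + p) (long.drop p) v :=
      posFrom_split long v p 0 hp
    have hb1 : ∀ x ∈ posFrom 0 (long.take p) v, x < (p : Int) := by
      intro x hx
      have h := posFrom_bounds (long.take p) v 0 x hx
      have hlen : (long.take p).length ≤ p := by simp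
      omega
    have hb2 : ∀ x ∈ posFrom ((0 : Int) + p) (long.drop p) v, (p : Int) ≤ x := by
      intro x hx
      have h := posFrom_bounds (long.drop p) v ((0 : Int) + p) x hx
      omega
    have hps : pos.getD v [] = posFrom 0 (long.take p) v ++ posFrom ((0 : Int) + p) (long.drop p) v := by
      rw [hpos v, hsplit]
    by_cases hmem : v ∈ long.drop p
    · obtain ⟨i, hi⟩ := Option.isSome_iff_exists.mp ((PySem.List.index?_isSome_iff _ _).mpr hmem)
      obtain ⟨hik, hvi, _⟩ := PySem.List.getElem_of_index?_eq_some hi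
      obtain ⟨t, ht⟩ := posFrom_head (long.drop p) v ((0 : Int) + p) i hi
      rw [if_pos hmem, hi]
      have hslice : PySem.List.slice (long.drop p) (some (i : Int)) none = long.drop (p + i) := by
        rw [PySem.List.slice_from_natCast, List.drop_drop]
      have hlb : lowerBound (pos.getD v []) (p : Int) 0 (pos.getD v []).length
          = (posFrom 0 (long.take p) v).length := by
        rw [hps]
        exact lowerBound_spec _ _ p hb1 hb2 0 _ (by omega) (by simp) (by simp)
      have hklt : (posFrom 0 (long.take p) v).length < (pos.getD v []).length := by
        rw [hps, ht]
        simp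
      have hgetk : (pos.getD v []).getD (posFrom 0 (long.take p) v).length 0 = ((p + i : Nat) : Int) := by
        rw [hps, List.getD_append_right _ _ 0 _ (le_refl _), ht]
        simp
      rw [hlb, if_pos hklt, hgetk]
      simp only [hslice]
      have hdl : (long.drop p).length = long.length - p := List.length_drop
      exact ih (acc ++ [v]) (p + i) (by omega)
    · rw [if_neg hmem]
      have hL2nil : posFrom ((0 : Int) + p) (long.drop p) v = [] :=
        posFrom_eq_nil (long.drop p) v _ hmem
      have hlb : lowerBound (pos.getD v []) (p : Int) 0 (pos.getD v []).length
          = (pos.getD v []).length := by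
        have hps' : pos.getD v [] = posFrom 0 (long.take p) v := by
          rw [hps, hL2nil, List.append_nil]
        rw [hps']
        have h := lowerBound_spec (posFrom 0 (long.take p) v) [] p hb1 (by simp) 0
          (posFrom 0 (long.take p) v).length (by omega) (le_refl _) (by simp)
        simpa using h
      rw [hlb, if_neg (lt_irrefl _)]
      exact ih acc p hp

theorem main_eq (long short : List Int) :
    (find_seqs short).foldl (fun groups_common seq =>
      groups_common ++ [(seq.foldl (fun (st : List Int × List Int) element =>
        if element ∈ st.2 then
          match PySem.List.index? st.2 element with
          | some index => (st.1 ++ [element], PySem.List.slice st.2 (some (index : Int)) none)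
          | none => st
        else st) (([] : List Int), long)).1]) []
    = (PySem.List.pyRange 0 (short.length : Int) 1).foldl (fun res s =>
        res ++ [((PySem.List.slice short (some s) none).foldl (fun (st : List Int × Int) v =>
          let ps := ((PySem.List.enumerate long 0).foldl
            (fun (d : PySem.Dict Int (List Int)) iv => d.modify iv.2 [] (fun l => l ++ [iv.1]))
            PySem.Dict.empty).getD v []
          let k := lowerBound ps st.2 0 ps.length
          if k < ps.length then (st.1 ++ [v], ps.getD k 0) else st) (([] : List Int), (0 : Int))).1]) [] := by
  rw [PySem.List.foldl_append_singleton_eq_map, PySem.List.foldl_append_singleton_eq_map]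
  simp only [List.nil_append]
  rw [find_seqs_eq_map_drop, PySem.List.pyRange_one]
  simp only [List.map_map]
  have hn : ((short.length : Int) - 0).toNat = short.length := by omega
  rw [hn]
  apply List.map_congr_left
  intro k hk
  simp only [Function.comp_apply, zero_add, PySem.List.slice_from_natCast]
  have h := row_equiv long _ (fun v => pos_getD_eq_posFrom long v) (short.drop k) [] 0 (by omega)
  simpa using h

-- ===== VERDICT (by name: the statement is the Claim_ definition above) =====
theorem just_seqs_spec : Claim_equal_just_seqs := by
  intro obj1 obj2 _
  unfold Spec_just_seqs just_seqs just_seqs_alt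
  simp only [PySem.List.foldl_append_ite_eq_filter, List.nil_append]
  have hfilt : obj1.filter (fun e => decide (e ∈ PySem.Set.ofList obj2))
      = obj1.filter (fun e => decide (e ∈ obj2)) := by
    apply List.filter_congr
    intro x _
    simp [PySem.Set.mem_ofList]
  rw [hfilt]
  set cs := PySem.Set.ofList (obj1.filter (fun e => decide (e ∈ obj2))) with hcs
  set f1 := obj1.filter (fun el => decide (el ∈ cs)) with hf1
  set f2 := obj2.filter (fun el => decide (el ∈ cs)) with hf2
  have hcond : (PySem.List.len f1 = max (PySem.List.len f1) (PySem.List.len f2))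
      ↔ f2.length ≤ f1.length := by
    simp only [PySem.List.len_eq]
    omega
  by_cases hc : f2.length ≤ f1.length
  · rw [if_pos (hcond.mpr hc), if_pos hc]
    exact main_eq f1 f2
  · rw [if_neg (fun h => hc (hcond.mp h)), if_neg hc]
    exact main_eq f2 f1
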